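-- pv_equiv track=rewrite | github.com/amilliiee/aoc | 2025/day06/solution.py | part2
-- ===== SOURCE A (Python) =====
-- def part2(data):
--     tot = 0
--     lines = data
--     max_len = max(len(line) for line in lines)
--     grid = [list(line.ljust(max_len)) for line in lines]
--
--     separators = []
--     for col in range(max_len):
--         if all(grid[row][col] == ' ' for row in range(len(grid))):
--             separators.append(col)
--
--     prev_sep = -1
--     for sep in separators + [max_len]:
--         if sep - prev_sep > 1:
--             prob_cols = range(prev_sep + 1, sep)
--             vals = []
--             for col in prob_cols:
--                 digits = []
--                 for row in range(len(grid) - 1):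
--                     ch = grid[row][col]
--                     if ch != ' ':
--                         digits.append(ch)
--                 if digits:
--                     n = int(''.join(digits))
--                     vals.append(n)
--
--             op_chars = []
--             for col in prob_cols:
--                 ch = grid[-1][col]
--                 if ch != ' ':
--                     op_chars.append(ch)
--             operator = op_chars[0] if op_chars else None
--             if operator == '+':
--                 result = sum(vals)
--             elif operator == '*':
--                 result = 1
--                 for val in vals:
--                     result *= val
--             tot += result
--         prev_sep = sep
--     return tot
-- ===== SOURCE B (Python) =====
-- def _product(vals):
--     result = 1
--     for v in vals:
--         result *= v
--     return result
--
--
-- OPS = {'+': sum, '*': _product}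
--
--
-- def part2(data):
--     *num_rows, op_line = data
--     width = max(map(len, data))
--
--     # one row-major pass: fold each number row into per-column digit buffers
--     buffers = [''] * width
--     for line in num_rows:
--         buffers = [buf if ch == ' ' else buf + ch
--                    for buf, ch in zip(buffers, line.ljust(width))]
--
--     cols = list(zip(buffers, op_line.ljust(width)))
--     total = 0
--     i = 0
--     while i < width:
--         buf, opch = cols[i]
--         if not buf and opch == ' ':
--             i += 1
--             continue
--         vals = []
--         op = None
--         while i < width:
--             buf, opch = cols[i]
--             if not buf and opch == ' ':
--                 break
--             if buf:
--                 vals.append(int(buf))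
--             if op is None and opch != ' ':
--                 op = opch
--             i += 1
--         total += OPS[op](vals)
--     return total
-- ===== Notes on version B (the rewrite author's own statement) =====
-- stated objective: alternative
-- what changed: B folds the number rows once into per-column digit-string buffers (no grid, no separator-index list, no nested per-block row scans) and then walks the (buffer, operator-char) pairs left to right with an inner while consuming each block, dispatching the operator through a dict of functions; Pre_ excludes the inputs where A raises (empty data, unparsable number, first block without +/* operator) and inputs with a later block lacking a +/* operator, where A accidentally re-adds the previous block's leftover result while B's operator-dispatch dict raises KeyError.
-- outside the precondition, e.g. on part2(['1 2', '+ x']): A returns 2, B raises KeyError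
import Mathlib
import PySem

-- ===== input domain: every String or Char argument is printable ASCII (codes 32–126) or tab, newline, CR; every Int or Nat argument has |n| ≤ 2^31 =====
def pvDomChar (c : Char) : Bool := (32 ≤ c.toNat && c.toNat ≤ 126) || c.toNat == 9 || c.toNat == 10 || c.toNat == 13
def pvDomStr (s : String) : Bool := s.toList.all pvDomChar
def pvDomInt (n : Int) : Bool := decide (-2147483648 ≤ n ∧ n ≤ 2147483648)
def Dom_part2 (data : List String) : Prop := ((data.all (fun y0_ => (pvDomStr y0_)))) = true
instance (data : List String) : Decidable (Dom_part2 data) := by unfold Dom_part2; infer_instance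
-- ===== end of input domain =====

-- B folds the number rows once into per-column digit-string buffers and then walks the
-- (buffer, operator) pairs left to right, consuming one block per inner loop with a
-- function-table operator dispatch (A materializes a grid, lists the all-space separator
-- columns and rescans rows per column per gap); same cost; B raises where a block lacks a
-- +/* operator, so Pre_ excludes those inputs.

-- ===== PORT A =====
-- max(len(line) for line in lines): Python max() raises ValueError on empty data (Pre_ excludes)
def pyA_maxLen (data : List String) : Int :=
  match data.map (fun line => PySem.Str.len line) with
  | [] => 0
  | x :: xs => xs.foldl max x

-- grid = [list(line.ljust(max_len)) for line in lines]
def pyA_grid (data : List String) (maxLen : Int) : List (List Char) :=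
  data.map (fun line => line.toList ++ List.replicate (maxLen - PySem.Str.len line).toNat ' ')

-- all(grid[row][col] == ' ' for row in range(len(grid)))
def pyA_isSep (grid : List (List Char)) (col : Int) : Bool :=
  (PySem.List.pyRange 0 (grid.length : Int) 1).all
    (fun row => PySem.List.pyGetD (PySem.List.pyGetD grid row []) col ' ' == ' ')

-- the digits loop over rows range(len(grid) - 1)
def pyA_digits (grid : List (List Char)) (col : Int) : List Char :=
  (PySem.List.pyRange 0 ((grid.length : Int) - 1) 1).foldl
    (fun dacc row =>
      let ch := PySem.List.pyGetD (PySem.List.pyGetD grid row []) col ' '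
      if ch ≠ ' ' then dacc ++ [ch] else dacc) []

-- the vals loop; int(''.join(digits)) is ofChars? (ValueError excluded by Pre_)
def pyA_vals (grid : List (List Char)) (lo hi : Int) : List Int :=
  (PySem.List.pyRange lo hi 1).foldl
    (fun vacc col =>
      let digits := pyA_digits grid col
      if digits ≠ [] then vacc ++ [(PySem.Int.ofChars? digits).getD 0] else vacc) []

-- the op_chars loop; grid[-1][col]
def pyA_opChars (grid : List (List Char)) (lo hi : Int) : List Char :=
  (PySem.List.pyRange lo hi 1).foldl
    (fun oacc col =>
      let ch := PySem.List.pyGetD (PySem.List.pyGetD grid (-1) []) col ' '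
      if ch ≠ ' ' then oacc ++ [ch] else oacc) []

-- one iteration of the main loop; state = (tot, result, prev_sep); result is the Python
-- variable that may be unbound (none = NameError on the first block, excluded by Pre_)
def pyA_step (grid : List (List Char)) (st : Int × Option Int × Int) (sep : Int) :
    Int × Option Int × Int :=
  if sep - st.2.2 > 1 then
    let vals := pyA_vals grid (st.2.2 + 1) sep
    let operator : Option Char := (pyA_opChars grid (st.2.2 + 1) sep).head?
    let res' : Option Int :=
      if operator = some '+' then some (vals.foldl (· + ·) 0)
      else if operator = some '*' then some (vals.foldl (· * ·) 1)
      else st.2.1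
    (st.1 + res'.getD 0, res', sep)
  else (st.1, st.2.1, sep)

def part2 (data : List String) : Int :=
  let maxLen := pyA_maxLen data
  let grid := pyA_grid data maxLen
  let separators := (PySem.List.pyRange 0 maxLen 1).foldl
    (fun acc col => if pyA_isSep grid col then acc ++ [col] else acc) []
  ((separators ++ [maxLen]).foldl (pyA_step grid) (0, none, -1)).1

-- ===== PORT B =====
-- width = max(map(len, data)): raises ValueError on empty data (Pre_ excludes)
def pbWidth (data : List String) : Int :=
  match data.map (fun line => PySem.Str.len line) with
  | [] => 0
  | x :: xs => xs.foldl max x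

-- line.ljust(width)
def pbPad (width : Int) (line : String) : List Char :=
  line.toList ++ List.replicate (width - PySem.Str.len line).toNat ' '

-- buffers = [''] * width, then per number row:
-- buffers = [buf if ch == ' ' else buf + ch for buf, ch in zip(buffers, line.ljust(width))]
def pbBuffers (data : List String) : List (List Char) :=
  data.dropLast.foldl
    (fun bufs line =>
      (bufs.zip (pbPad (pbWidth data) line)).map
        (fun p => if p.2 = ' ' then p.1 else p.1 ++ [p.2]))
    (List.replicate (pbWidth data).toNat [])

-- `not buf and opch == ' '`
def pbBlank (p : List Char × Char) : Bool := p.1.isEmpty && p.2 == ' '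

-- the outer while: skip blank pairs, else consume one block (the inner while) and dispatch;
-- `OPS[op](vals)` raises KeyError on a missing/unknown operator (Pre_ excludes; the final
-- `else 0` arm is that excluded region)
def pbWalk : List (List Char × Char) → Int
  | [] => 0
  | p :: t =>
    if pbBlank p then pbWalk t
    else
      let block := (p :: t).takeWhile (fun q => !pbBlank q)
      let vals := block.foldl
        (fun vals q => if q.1 ≠ [] then vals ++ [(PySem.Int.ofChars? q.1).getD 0] else vals) []
      let op := block.foldl
        (fun op q => if op = (none : Option Char) ∧ q.2 ≠ ' ' then some q.2 else op)
        (none : Option Char)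
      (if op = some '+' then vals.foldl (· + ·) 0
       else if op = some '*' then vals.foldl (· * ·) 1
       else 0) + pbWalk ((p :: t).dropWhile (fun q => !pbBlank q))
termination_by cols => cols.length
decreasing_by
  · simp
  · rename_i h
    rw [List.dropWhile_cons]
    simp only [h]
    have := List.length_dropWhile_le (p := fun q => !pbBlank q) (l := t)
    simp only [Bool.not_eq_eq_eq_not, Bool.not_true] at *
    simp
    omega

-- *num_rows, op_line = data : op_line is the last line (ValueError on [] excluded by Pre_)
def part2_alt (data : List String) : Int :=
  pbWalk ((pbBuffers data).zip (pbPad (pbWidth data) (data.getLastD "")))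

-- ===== PRECONDITION & SPEC =====
-- Pre_ reads the input's block structure through its OWN helpers (pre*), independent of
-- both ports: pad lines, transpose to columns, group maximal runs of non-blank columns.
def preWidth (data : List String) : Int :=
  data.foldl (fun acc l => max acc (l.toList.length : Int)) 0

-- column i read straight off the raw lines: a position past a line's end is the pad blank
def preCols (data : List String) : List (List Char) :=
  (List.range (preWidth data).toNat).map (fun i => data.map (fun l => l.toList.getD i ' '))

def preGroup : List (List Char) → List (List Char) → List (List (List Char))
  | cur, [] => if cur = [] then [] else [cur]
  | cur, c :: t =>
    if c.any (fun ch => !(ch == ' ')) then preGroup (cur ++ [c]) t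
    else (if cur = [] then preGroup [] t else cur :: preGroup [] t)

def preBlocks (data : List String) : List (List (List Char)) := preGroup [] (preCols data)

def preDigits (c : List Char) : List Char :=
  (c.take (c.length - 1)).filter (fun ch => !(ch == ' '))

def preOp (block : List (List Char)) : Option Char :=
  (block.filterMap (fun c => c.getLast?)).find? (fun ch => !(ch == ' '))

def preGoodOp (block : List (List Char)) : Bool :=
  preOp block == some '+' || preOp block == some '*'

-- Pre_ excludes the inputs where A raises — empty data (ValueError from max()), a number
-- column that is not a valid int literal (ValueError from int()), a FIRST block without a
-- +/* operator (NameError) — and the inputs with a LATER block lacking a +/* operator,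
-- where A accidentally re-adds the previous block's leftover result while B's
-- operator-dispatch dict raises KeyError.
def Pre_part2 (data : List String) : Prop :=
  data ≠ [] ∧
  (∀ b ∈ preBlocks data, ∀ c ∈ b,
      preDigits c ≠ [] → (PySem.Int.ofChars? (preDigits c)).isSome = true) ∧
  (∀ b ∈ preBlocks data, preGoodOp b = true)
instance (data : List String) : Decidable (Pre_part2 data) := by
  unfold Pre_part2; infer_instance

def pvWitness_part2 : List String := ["12 3", "34 4", "+  *"]

def Spec_part2 (data : List String) (out : Int) : Prop :=
  out = part2_alt data
instance (data : List String) (out : Int) : Decidable (Spec_part2 data out) := by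
  unfold Spec_part2; infer_instance

-- ===== CLAIM (what is proved, stated in full; the proofs are below) =====
def Claim_equal_part2 : Prop :=
  ∀ (data : List String), Dom_part2 data → Pre_part2 data → Spec_part2 data (part2 data)

-- ===== LEMMAS AND PROOFS =====

-- proof-side view shared by both directions: the padded columns and their grouping
def pvCols (data : List String) : List (List Char) :=
  (List.range (pbWidth data).toNat).map (fun i => data.map (fun l => l.toList.getD i ' '))

def pvIsBlank (c : List Char) : Bool := c.all (fun ch => ch == ' ')

def pvDigits (c : List Char) : List Char := c.dropLast.filter (fun ch => ch ≠ ' ')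

def pvVals (block : List (List Char)) : List Int :=
  block.foldl
    (fun vacc col =>
      let digits := pvDigits col
      if digits ≠ [] then vacc ++ [(PySem.Int.ofChars? digits).getD 0] else vacc) []

def pvOps (block : List (List Char)) : List Char :=
  block.foldl
    (fun oacc col =>
      let ch := PySem.List.pyGetD col (-1) ' '
      if ch ≠ ' ' then oacc ++ [ch] else oacc) []

def pvOp (block : List (List Char)) : Option Char := (pvOps block).head?

def pvGoodOp (block : List (List Char)) : Bool :=
  pvOp block == some '+' || pvOp block == some '*'

def pvGroup : List (List Char) → List (List Char) → List (List (List Char))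
  | cur, [] => if cur = [] then [] else [cur]
  | cur, c :: t =>
    if pvIsBlank c then (if cur = [] then pvGroup [] t else cur :: pvGroup [] t)
    else pvGroup (cur ++ [c]) t

def pvBlocks (data : List String) : List (List (List Char)) := pvGroup [] (pvCols data)

-- column j of the padded grid
def colAt (grid : List (List Char)) (j : Nat) : List Char := grid.map (fun r => r.getD j ' ')

-- A's `result` update for one block
def pvUpd (b : List (List Char)) (res : Option Int) : Option Int :=
  if pvOp b = some '+' then some ((pvVals b).foldl (· + ·) 0)
  else if pvOp b = some '*' then some ((pvVals b).foldl (· * ·) 1)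
  else res

-- A's main-loop effect of one block on (tot, result)
def pvStepA (st : Int × Option Int) (b : List (List Char)) : Int × Option Int :=
  (st.1 + (pvUpd b st.2).getD 0, pvUpd b st.2)

-- a block's value when its operator is + or *
def evalG (b : List (List Char)) : Int :=
  if pvOp b = some '+' then (pvVals b).foldl (· + ·) 0
  else if pvOp b = some '*' then (pvVals b).foldl (· * ·) 1
  else 0

-- the pair B's walk sees for a column
def pvPairOf (c : List Char) : List Char × Char := (pvDigits c, c.getLastD ' ')

-- conditional append with a Prop test (the Bool form is PySem.List.foldl_append_if)
lemma foldl_ite_append {α β : Type} (p : β → Prop) [DecidablePred p] (f : α → β) :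
    ∀ (l : List α) (acc : List β),
      l.foldl (fun a x => if p (f x) then a ++ [f x] else a) acc
        = acc ++ (l.map f).filter (fun y => decide (p y)) := by
  intro l
  induction l with
  | nil => simp
  | cons x t ih =>
    intro acc
    by_cases hx : p (f x) <;> simp [hx, ih]

lemma drop_take_eq_map_range {α : Type} (xs : List α) (d : α) (r m : Nat)
    (h : r + m ≤ xs.length) :
    (xs.drop r).take m = (List.range m).map (fun k => xs.getD (r + k) d) := by
  apply List.ext_getElem
  · simp only [List.length_take, List.length_drop, List.length_map, List.length_range]
    omega
  · intro i h1 h2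
    simp only [List.length_take, List.length_drop] at h1
    simp only [List.getElem_take, List.getElem_drop, List.getElem_map, List.getElem_range]
    rw [List.getD_eq_getElem xs d (by omega)]

lemma seg_snoc {α : Type} (xs : List α) (d : α) (r a : Nat) (hr : r ≤ a) (ha : a < xs.length) :
    (xs.drop r).take (a - r) ++ [xs.getD a d] = (xs.drop r).take (a + 1 - r) := by
  have h1 : a + 1 - r = (a - r) + 1 := by omega
  rw [h1, List.take_add_one]
  have h2 : (xs.drop r)[a - r]? = some (xs.getD a d) := by
    rw [List.getElem?_drop]
    rw [List.getD_eq_getElem xs d (by omega)]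
    rw [List.getElem?_eq_getElem (by omega)]
    congr 1
    congr 1
    omega
  rw [h2]
  rfl

lemma seg_ne_nil {α : Type} (xs : List α) (r a : Nat) (hr : r < a) (ha : a ≤ xs.length) :
    (xs.drop r).take (a - r) ≠ [] := by
  apply List.ne_nil_of_length_pos
  simp [List.length_take, List.length_drop]
  omega

lemma isSep_eq (grid : List (List Char)) (j : Nat) :
    pyA_isSep grid ((j : Nat) : Int) = pvIsBlank (colAt grid j) := by
  unfold pyA_isSep pvIsBlank colAt
  rw [PySem.List.pyRange_one, List.all_map, List.all_map]
  rw [Bool.eq_iff_iff, List.all_eq_true, List.all_eq_true]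
  constructor
  · intro h r hr
    obtain ⟨k, hk, rfl⟩ := List.mem_iff_getElem.mp hr
    have := h k (by simp; omega)
    simpa [PySem.List.pyGetD_natCast, List.getD_eq_getElem?_getD,
      List.getElem?_eq_getElem hk] using this
  · intro h k hk
    simp only [List.mem_range] at hk
    have hk' : k < grid.length := by omega
    have := h (grid[k]) (List.getElem_mem hk')
    simpa [PySem.List.pyGetD_natCast, List.getD_eq_getElem?_getD,
      List.getElem?_eq_getElem hk'] using this

lemma digits_eq (grid : List (List Char)) (hg : grid ≠ []) (j : Nat) :
    pyA_digits grid ((j : Nat) : Int) = pvDigits (colAt grid j) := by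
  unfold pyA_digits
  have hgl : 1 ≤ grid.length := List.length_pos_iff.mpr hg
  have h1 : ((grid.length : Int) - 1) = ((grid.dropLast.length : Nat) : Int) := by
    simp [List.length_dropLast]; omega
  rw [h1]
  rw [PySem.List.foldl_congr_mem _ _
        (fun dacc row => if PySem.List.pyGetD (PySem.List.pyGetD grid.dropLast row []) (j : Int) ' ' ≠ ' '
            then dacc ++ [PySem.List.pyGetD (PySem.List.pyGetD grid.dropLast row []) (j : Int) ' ']
            else dacc) _
        (by
          intro acc x hx
          dsimp only
          have hx' := PySem.List.mem_pyRange_one.mp hx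
          have hxl : x < (grid.dropLast.length : Int) := hx'.2
          have h0 : (0:Int) ≤ x := hx'.1
          have hxg : x < (grid.length : Int) := by simp [List.length_dropLast] at hxl ⊢; omega
          rw [PySem.List.pyGetD_eq_getElem grid [] h0 hxg,
              PySem.List.pyGetD_eq_getElem grid.dropLast [] h0 (by simpa using hxl),
              List.getElem_dropLast])]
  rw [PySem.List.foldl_pyRange_zero_pyGetD' grid.dropLast []
        (fun dacc r => if PySem.List.pyGetD r (j : Int) ' ' ≠ ' '
            then dacc ++ [PySem.List.pyGetD r (j : Int) ' '] else dacc) []]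
  simp only [PySem.List.pyGetD_natCast]
  rw [foldl_ite_append (fun ch => ch ≠ ' ') (fun r : List Char => r.getD j ' ')]
  simp [pvDigits, colAt, ← List.map_dropLast]

lemma vals_eq (grid cols : List (List Char)) (hg : grid ≠ [])
    (hcol : ∀ j, j < cols.length → cols.getD j [] = colAt grid j)
    (r a : Nat) (hr : r ≤ a) (ha : a ≤ cols.length) :
    pyA_vals grid (r : Int) (a : Int) = pvVals ((cols.drop r).take (a - r)) := by
  unfold pyA_vals pvVals
  rw [drop_take_eq_map_range cols [] r (a - r) (by omega), List.foldl_map,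
      PySem.List.pyRange_one, List.foldl_map]
  rw [show ((a : Int) - (r : Int)).toNat = a - r by omega]
  apply PySem.List.foldl_congr_mem
  intro acc k hk
  simp only [List.mem_range] at hk
  dsimp only
  rw [show ((r : Int) + (k : Int)) = ((r + k : Nat) : Int) by push_cast; ring]
  rw [digits_eq grid hg (r + k), hcol (r + k) (by omega)]

lemma ops_eq (grid cols : List (List Char)) (hg : grid ≠ [])
    (hcol : ∀ j, j < cols.length → cols.getD j [] = colAt grid j)
    (r a : Nat) (hr : r ≤ a) (ha : a ≤ cols.length) :
    pyA_opChars grid (r : Int) (a : Int) = pvOps ((cols.drop r).take (a - r)) := by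
  unfold pyA_opChars pvOps
  rw [drop_take_eq_map_range cols [] r (a - r) (by omega), List.foldl_map,
      PySem.List.pyRange_one, List.foldl_map]
  rw [show ((a : Int) - (r : Int)).toNat = a - r by omega]
  apply PySem.List.foldl_congr_mem
  intro acc k hk
  simp only [List.mem_range] at hk
  dsimp only
  rw [show ((r : Int) + (k : Int)) = ((r + k : Nat) : Int) by push_cast; ring]
  rw [hcol (r + k) (by omega)]
  have hcol_ne : colAt grid (r + k) ≠ [] := by
    simp [colAt, hg]
  rw [PySem.List.pyGetD_neg_one grid [] hg,
      PySem.List.pyGetD_neg_one (colAt grid (r + k)) ' ' hcol_ne]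
  unfold colAt
  rw [List.getLast_map, PySem.List.pyGetD_natCast]

lemma step_fire (grid cols : List (List Char)) (hg : grid ≠ [])
    (hcol : ∀ j, j < cols.length → cols.getD j [] = colAt grid j)
    (r a : Nat) (hra : r < a) (ha : a ≤ cols.length) (tot : Int) (res : Option Int) :
    pyA_step grid (tot, res, (r : Int) - 1) (a : Int)
      = ((pvStepA (tot, res) ((cols.drop r).take (a - r))).1,
         (pvStepA (tot, res) ((cols.drop r).take (a - r))).2, (a : Int)) := by
  unfold pyA_step
  rw [if_pos (by simp only; omega)]
  dsimp only
  rw [show ((r : Int) - 1 + 1) = (r : Int) by ring]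
  rw [vals_eq grid cols hg hcol r a (le_of_lt hra) ha,
      ops_eq grid cols hg hcol r a (le_of_lt hra) ha]
  unfold pvStepA pvUpd pvOp
  rfl

lemma step_skip (grid : List (List Char)) (r : Nat) (tot : Int) (res : Option Int) :
    pyA_step grid (tot, res, (r : Int) - 1) (r : Int) = (tot, res, (r : Int)) := by
  unfold pyA_step
  rw [if_neg (by simp only; omega)]

lemma scan (grid cols : List (List Char)) (hg : grid ≠ [])
    (hsep : ∀ j : Nat, j < cols.length → pyA_isSep grid (j : Int) = pvIsBlank (cols.getD j []))
    (hcol : ∀ j, j < cols.length → cols.getD j [] = colAt grid j) :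
    ∀ (n a r : Nat) (tot : Int) (res : Option Int), a + n = cols.length → r ≤ a →
      ((((List.range' a n).map (fun j => Int.ofNat j)).filter (fun s => pyA_isSep grid s))
          ++ [(cols.length : Int)]).foldl (pyA_step grid) (tot, res, (r : Int) - 1)
        = (((pvGroup ((cols.drop r).take (a - r)) (cols.drop a)).foldl pvStepA (tot, res)).1,
           ((pvGroup ((cols.drop r).take (a - r)) (cols.drop a)).foldl pvStepA (tot, res)).2,
           (cols.length : Int)) := by
  intro n
  induction n with
  | zero =>
    intro a r tot res hlen hr
    have ha : a = cols.length := by omega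
    subst ha
    simp only [List.range'_zero, List.map_nil, List.filter_nil, List.nil_append,
      List.foldl_cons, List.foldl_nil, List.drop_length]
    rcases Nat.eq_or_lt_of_le hr with hra | hra
    · subst hra
      rw [step_skip]
      simp [pvGroup]
    · rw [step_fire grid cols hg hcol r cols.length hra (le_refl _)]
      have hseg : (cols.drop r).take (cols.length - r) = cols.drop r :=
        List.take_of_length_le (by simp [List.length_drop])
      have hne' : cols.drop r ≠ [] :=
        List.ne_nil_of_length_pos (by simp [List.length_drop]; omega)
      rw [hseg]
      simp [pvGroup, hne']
  | succ m ih =>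
    intro a r tot res hlen hr
    have halen : a < cols.length := by omega
    have hdropa : cols.drop a = cols.getD a [] :: cols.drop (a + 1) := by
      rw [List.drop_eq_getElem_cons halen, List.getD_eq_getElem cols [] halen]
    rw [List.range'_succ, List.map_cons, List.filter_cons, Int.ofNat_eq_natCast a]
    by_cases hs : pvIsBlank (cols.getD a []) = true
    · rw [show pyA_isSep grid ((a : Nat) : Int) = true from (hsep a halen).trans hs]
      rw [if_pos rfl, List.cons_append, List.foldl_cons]
      rcases Nat.eq_or_lt_of_le hr with hra | hra
      · -- r = a : empty gap, the separator only advances prev_sep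
        subst hra
        rw [step_skip]
        rw [show ((r : Nat) : Int) = ((r + 1 : Nat) : Int) - 1 by push_cast; ring]
        rw [ih (r + 1) (r + 1) tot res (by omega) (le_refl _)]
        rw [hdropa, Nat.sub_self]
        simp only [List.getD_eq_getElem?_getD] at hs
        simp [pvGroup, hs]
      · -- r < a : the block of columns [r, a) is processed
        rw [step_fire grid cols hg hcol r a hra (le_of_lt halen)]
        rw [show ((a : Nat) : Int) = ((a + 1 : Nat) : Int) - 1 by push_cast; ring]
        rw [ih (a + 1) (a + 1) ((pvStepA (tot, res) ((cols.drop r).take (a - r))).1)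
              ((pvStepA (tot, res) ((cols.drop r).take (a - r))).2) (by omega) (le_refl _)]
        rw [hdropa, Nat.sub_self]
        have hseg_ne : (cols.drop r).take (a - r) ≠ [] :=
          seg_ne_nil cols r a hra (le_of_lt halen)
        simp only [List.getD_eq_getElem?_getD] at hs
        simp [pvGroup, hs, hseg_ne]
    · have hsF : pyA_isSep grid ((a : Nat) : Int) = false := by
        rw [hsep a halen]; exact Bool.eq_false_iff.mpr hs
      rw [hsF, if_neg (by simp)]
      rw [ih (a + 1) r tot res (by omega) (by omega)]
      rw [hdropa]
      have hgrp : pvGroup ((cols.drop r).take (a - r)) (cols.getD a [] :: cols.drop (a + 1))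
          = pvGroup ((cols.drop r).take (a - r) ++ [cols.getD a []]) (cols.drop (a + 1)) := by
        rw [pvGroup]
        rw [if_neg hs]
      rw [hgrp, seg_snoc cols [] r a hr halen]

lemma maxLen_facts (data : List String) (hne : data ≠ []) :
    0 ≤ pyA_maxLen data ∧ ∀ l ∈ data, (l.toList.length : Int) ≤ pyA_maxLen data := by
  cases data with
  | nil => exact absurd rfl hne
  | cons d t =>
    have h := PySem.List.le_foldl_max (t.map (fun line => PySem.Str.len line)) (PySem.Str.len d)
    have hredu : pyA_maxLen (d :: t)
        = (t.map (fun line => PySem.Str.len line)).foldl max (PySem.Str.len d) := rfl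
    constructor
    · rw [hredu]
      refine le_trans ?_ h.1
      simp [PySem.Str.len_eq]
    · intro l hl
      rw [hredu]
      rcases List.mem_cons.mp hl with rfl | hl
      · simpa [PySem.Str.len_eq] using h.1
      · have := h.2 (PySem.Str.len l) (List.mem_map_of_mem hl)
        simpa [PySem.Str.len_eq] using this

lemma getLastD_getLast {α : Type} (l : List α) (d : α) (h : l ≠ []) :
    l.getLastD d = l.getLast h := by
  rw [List.getLastD_eq_getLast?, List.getLast?_eq_some_getLast h]
  rfl

-- a padded line read with getD agrees with the raw line read with getD
lemma padGetD (width : Int) (l : String) (i : Nat) :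
    (pbPad width l).getD i ' ' = l.toList.getD i ' ' := by
  unfold pbPad
  by_cases h : i < l.toList.length
  · rw [List.getD_append _ _ _ _ h]
  · rw [List.getD_append_right _ _ _ _ (by omega)]
    rw [List.getD_eq_getElem?_getD, List.getD_eq_getElem?_getD,
        List.getElem?_replicate, List.getElem?_eq_none (by omega)]
    split_ifs <;> rfl

lemma padLen (width : Int) (l : String) (hl : (l.toList.length : Int) ≤ width) :
    (pbPad width l).length = width.toNat := by
  have hl' : (l.length : Int) ≤ width := by simpa using hl
  simp [pbPad, PySem.Str.len_eq]
  omega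

lemma A_eq (data : List String) (hne : data ≠ []) :
    part2 data = ((pvBlocks data).foldl pvStepA (0, (none : Option Int))).1 := by
  have hW0 : 0 ≤ pyA_maxLen data := (maxLen_facts data hne).1
  have hg : pyA_grid data (pyA_maxLen data) ≠ [] := by
    simp [pyA_grid, hne]
  have hWw : pbWidth data = pyA_maxLen data := rfl
  have hlen : (pvCols data).length = (pyA_maxLen data).toNat := by
    simp [pvCols, hWw]
  have hcol : ∀ j, j < (pvCols data).length →
      (pvCols data).getD j [] = colAt (pyA_grid data (pyA_maxLen data)) j := by
    intro j hj
    rw [List.getD_eq_getElem (pvCols data) [] hj]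
    have hj' : j < (pbWidth data).toNat := by
      simpa [pvCols] using hj
    unfold pvCols
    simp only [List.getElem_map, List.getElem_range]
    unfold colAt pyA_grid
    rw [List.map_map]
    apply List.map_congr_left
    intro l _
    exact (padGetD (pyA_maxLen data) l j).symm
  have hsep : ∀ j : Nat, j < (pvCols data).length →
      pyA_isSep (pyA_grid data (pyA_maxLen data)) (j : Int)
        = pvIsBlank ((pvCols data).getD j []) := by
    intro j hj
    rw [hcol j hj]
    exact isSep_eq _ j
  have hscan := scan (pyA_grid data (pyA_maxLen data)) (pvCols data) hg hsep hcol
    (pvCols data).length 0 0 0 none (by omega) (le_refl 0)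
  simp only [List.drop_zero, Nat.sub_zero, List.take_zero, Nat.cast_zero, zero_sub,
    ← List.range_eq_range'] at hscan
  show ((((PySem.List.pyRange 0 (pyA_maxLen data) 1).foldl
      (fun acc col => if pyA_isSep (pyA_grid data (pyA_maxLen data)) col then acc ++ [col] else acc)
      []) ++ [pyA_maxLen data]).foldl
        (pyA_step (pyA_grid data (pyA_maxLen data))) (0, none, -1)).1 = _
  rw [PySem.List.foldl_append_if_eq_filter
        (pyA_isSep (pyA_grid data (pyA_maxLen data)))]
  rw [List.nil_append, PySem.List.pyRange_one]
  have hcast : ((pyA_maxLen data) - 0).toNat = (pvCols data).length := by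
    rw [hlen]; omega
  rw [hcast]
  have hLint : (((pvCols data).length : Nat) : Int) = pyA_maxLen data := by
    rw [hlen]; omega
  rw [show (fun k : Nat => (0 : Int) + (k : Int)) = (fun j : Nat => Int.ofNat j) from by
        funext k; simp]
  rw [show [pyA_maxLen data] = [(((pvCols data).length : Nat) : Int)] from by rw [hLint]]
  rw [hscan]
  rfl

-- ---------- B side ----------

-- one number row folded into the buffers, column by column
lemma rowStep (width : Int) (bufs : List (List Char)) (line : String)
    (hb : bufs.length = width.toNat) (hl : (line.toList.length : Int) ≤ width) :
    (bufs.zip (pbPad width line)).map (fun p => if p.2 = ' ' then p.1 else p.1 ++ [p.2])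
    = (List.range width.toNat).map (fun i =>
        bufs.getD i [] ++ List.filter (fun ch => ch ≠ ' ') [line.toList.getD i ' ']) := by
  have hp : (pbPad width line).length = width.toNat := padLen width line hl
  apply List.ext_getElem
  · simp [hb, hp]
  · intro i h1 h2
    simp only [List.length_map, List.length_zip, hb, hp, Nat.min_self] at h1
    simp only [List.getElem_map, List.getElem_zip, List.getElem_range]
    rw [show (pbPad width line)[i] = (pbPad width line).getD i ' ' from
          (List.getD_eq_getElem _ ' ' (by omega)).symm,
        padGetD width line i,
        show bufs[i] = bufs.getD i [] from (List.getD_eq_getElem _ [] (by omega)).symm]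
    by_cases hc : line.toList[i]?.getD ' ' = ' ' <;>
      simp [List.getD_eq_getElem?_getD, hc]

lemma buffers_fold (width : Int) :
    ∀ (rows : List String), (∀ l ∈ rows, (l.toList.length : Int) ≤ width) →
    ∀ (bufs : List (List Char)), bufs.length = width.toNat →
    rows.foldl
      (fun bufs line =>
        (bufs.zip (pbPad width line)).map (fun p => if p.2 = ' ' then p.1 else p.1 ++ [p.2]))
      bufs
    = (List.range width.toNat).map (fun i =>
        bufs.getD i [] ++ (rows.map (fun l => l.toList.getD i ' ')).filter (fun ch => ch ≠ ' ')) := by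
  intro rows
  induction rows with
  | nil =>
    intro _ bufs hb
    simp only [List.foldl_nil, List.map_nil, List.filter_nil, List.append_nil]
    apply List.ext_getElem
    · simp [hb]
    · intro i h1 h2
      simp only [List.getElem_map, List.getElem_range]
      rw [List.getD_eq_getElem _ [] (by simp only [List.length_map, List.length_range] at h2; omega)]
  | cons r rs ih =>
    intro hlens bufs hb
    rw [List.foldl_cons]
    rw [rowStep width bufs r hb (hlens r List.mem_cons_self)]
    rw [ih (fun l hl => hlens l (List.mem_cons_of_mem _ hl)) _ (by simp)]
    apply List.map_congr_left
    intro i hi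
    simp only [List.mem_range] at hi
    rw [List.getD_eq_getElem ((List.range width.toNat).map _) []
          (by simp only [List.length_map, List.length_range]; exact hi)]
    simp only [List.getElem_map, List.getElem_range]
    rw [List.map_cons,
        show r.toList.getD i ' ' :: List.map (fun l => l.toList.getD i ' ') rs
          = [r.toList.getD i ' '] ++ List.map (fun l => l.toList.getD i ' ') rs from rfl,
        List.filter_append, List.append_assoc]

lemma buffers_spec (data : List String) (hne : data ≠ []) :
    pbBuffers data = (List.range (pbWidth data).toNat).map (fun i =>
      (data.dropLast.map (fun l => l.toList.getD i ' ')).filter (fun ch => ch ≠ ' ')) := by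
  have hmax := maxLen_facts data hne
  unfold pbBuffers
  rw [buffers_fold (pbWidth data) data.dropLast
        (fun l hl => hmax.2 l ((List.dropLast_sublist data).mem hl))
        (List.replicate (pbWidth data).toNat []) (by simp)]
  apply List.map_congr_left
  intro i _
  simp

-- the zipped (buffer, operator) list is the column list seen through pvPairOf
lemma zip_eq_map (data : List String) (hne : data ≠ []) :
    (pbBuffers data).zip (pbPad (pbWidth data) (data.getLastD ""))
      = (pvCols data).map pvPairOf := by
  have hmax := maxLen_facts data hne
  have hlastmem : data.getLastD "" ∈ data := by
    rw [getLastD_getLast data "" hne]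
    exact List.getLast_mem hne
  have hp : (pbPad (pbWidth data) (data.getLastD "")).length = (pbWidth data).toNat :=
    padLen _ _ (hmax.2 _ hlastmem)
  rw [buffers_spec data hne]
  apply List.ext_getElem
  · simp only [List.length_zip, List.length_map, List.length_range, hp, Nat.min_self,
      pvCols]
  · intro i h1 h2
    simp only [List.length_zip, List.length_map, List.length_range, hp, Nat.min_self] at h1
    simp only [List.getElem_zip, List.getElem_map, List.getElem_range, pvCols, pvPairOf]
    have hdne : data.map (fun l => l.toList.getD i ' ') ≠ [] := by
      intro hmapnil
      exact hne (List.map_eq_nil_iff.mp hmapnil)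
    rw [Prod.mk.injEq]
    refine ⟨?_, ?_⟩
    · -- buffers component = pvDigits of the column
      unfold pvDigits
      rw [← List.map_dropLast]
    · -- pad component = last element of the column
      rw [show (pbPad (pbWidth data) (data.getLastD ""))[i]
            = (pbPad (pbWidth data) (data.getLastD "")).getD i ' ' from
            (List.getD_eq_getElem _ ' ' (by omega)).symm,
          padGetD]
      rw [getLastD_getLast _ ' ' hdne, List.getLast_map]
      rw [getLastD_getLast data "" hne]

-- blankness of a pair vs blankness of its column
lemma blank_eq (c : List Char) (hc : c ≠ []) :
    pbBlank (pvPairOf c) = pvIsBlank c := by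
  unfold pbBlank pvPairOf pvIsBlank pvDigits
  conv_rhs => rw [← List.dropLast_append_getLast hc]
  rw [getLastD_getLast c ' ' hc]
  rw [Bool.eq_iff_iff]
  simp [List.filter_eq_nil_iff, List.all_eq_true, List.isEmpty_iff]

-- the first-operator fold
lemma opFold_some (l : List Char) (x : Char) :
    l.foldl (fun op o => if op = (none : Option Char) ∧ o ≠ ' ' then some o else op) (some x)
      = some x := by
  induction l with
  | nil => rfl
  | cons o t ih => simpa using ih

lemma opFold_none : ∀ l : List Char,
    l.foldl (fun op o => if op = (none : Option Char) ∧ o ≠ ' ' then some o else op) none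
      = (l.filter (fun o => o ≠ ' ')).head? := by
  intro l
  induction l with
  | nil => rfl
  | cons o t ih =>
    rw [List.foldl_cons, List.filter_cons]
    by_cases ho : o = ' '
    · rw [if_neg (fun hc => hc.2 ho), if_neg (by simp [ho])]
      exact ih
    · rw [if_pos ⟨rfl, ho⟩, opFold_some, if_pos (by simp [ho])]
      simp

-- the op list read with pyGetD -1 vs read with getLastD
lemma pvOps_eq (b : List (List Char)) (h : ∀ c ∈ b, c ≠ []) :
    pvOps b = (b.map (fun c => c.getLastD ' ')).filter (fun o => o ≠ ' ') := by
  unfold pvOps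
  rw [show (fun (oacc : List Char) (col : List Char) =>
        let ch := PySem.List.pyGetD col (-1) ' '
        if ch ≠ ' ' then oacc ++ [ch] else oacc)
      = (fun oacc col =>
        if PySem.List.pyGetD col (-1) ' ' ≠ ' '
        then oacc ++ [PySem.List.pyGetD col (-1) ' '] else oacc) from rfl]
  rw [foldl_ite_append (fun ch => ch ≠ ' ') (fun col : List Char => PySem.List.pyGetD col (-1) ' ')]
  rw [List.nil_append]
  congr 1
  apply List.map_congr_left
  intro c hc
  rw [PySem.List.pyGetD_neg_one c ' ' (h c hc), getLastD_getLast c ' ' (h c hc)]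

-- predicate congruence for takeWhile / dropWhile on members
lemma tw_congr {α : Type} (p q : α → Bool) :
    ∀ l : List α, (∀ x ∈ l, p x = q x) → l.takeWhile p = l.takeWhile q := by
  intro l
  induction l with
  | nil => intro _; rfl
  | cons x t ih =>
    intro h
    rw [List.takeWhile_cons, List.takeWhile_cons, h x List.mem_cons_self]
    split_ifs with hx
    · rw [ih (fun y hy => h y (List.mem_cons_of_mem _ hy))]
    · rfl

lemma dw_congr {α : Type} (p q : α → Bool) :
    ∀ l : List α, (∀ x ∈ l, p x = q x) → l.dropWhile p = l.dropWhile q := by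
  intro l
  induction l with
  | nil => intro _; rfl
  | cons x t ih =>
    intro h
    rw [List.dropWhile_cons, List.dropWhile_cons, h x List.mem_cons_self]
    split_ifs with hx
    · rw [ih (fun y hy => h y (List.mem_cons_of_mem _ hy))]
    · rfl

-- grouping splits at the first blank column
lemma group_span : ∀ (cs cur : List (List Char)),
    pvGroup cur cs
      = pvGroup (cur ++ cs.takeWhile (fun c => !pvIsBlank c))
          (cs.dropWhile (fun c => !pvIsBlank c)) := by
  intro cs
  induction cs with
  | nil => intro cur; simp
  | cons c t ih =>
    intro cur
    rw [List.takeWhile_cons, List.dropWhile_cons]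
    by_cases hb : pvIsBlank c
    · simp only [hb, Bool.not_true, Bool.false_eq_true, if_false]
      simp
    · rw [Bool.not_eq_true] at hb
      simp only [hb, Bool.not_false, if_true]
      rw [show pvGroup cur (c :: t) = pvGroup (cur ++ [c]) t from by
            rw [pvGroup]; rw [if_neg (by simp [hb])]]
      rw [ih (cur ++ [c]), List.append_assoc]
      rfl

lemma group_cons_span (c : List Char) (t : List (List Char)) (hb : pvIsBlank c = false) :
    pvGroup [] (c :: t)
      = (c :: t).takeWhile (fun c => !pvIsBlank c)
          :: pvGroup [] ((c :: t).dropWhile (fun c => !pvIsBlank c)) := by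
  rw [group_span (c :: t) [], List.nil_append]
  have htw : (c :: t).takeWhile (fun c => !pvIsBlank c) ≠ [] := by
    rw [List.takeWhile_cons, if_pos (by simp [hb])]
    simp
  cases hdw : (c :: t).dropWhile (fun c => !pvIsBlank c) with
  | nil =>
    rw [pvGroup, if_neg htw, pvGroup, if_pos rfl]
  | cons r rs =>
    have hw : (c :: t).dropWhile (fun c => !pvIsBlank c) ≠ [] := by
      rw [hdw]; simp
    have hr : pvIsBlank r = true := by
      have hhead := List.head_dropWhile_not (fun c => !pvIsBlank c) hw
      have ha : ((c :: t).dropWhile (fun c => !pvIsBlank c)).head? = some r := by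
        rw [hdw]; rfl
      have hb2 : ((c :: t).dropWhile (fun c => !pvIsBlank c)).head?
          = some (((c :: t).dropWhile (fun c => !pvIsBlank c)).head hw) :=
        List.head?_eq_some_head hw
      rw [ha] at hb2
      rw [(Option.some.inj hb2).symm] at hhead
      simpa using hhead
    rw [pvGroup, if_pos hr, if_neg htw, pvGroup, if_pos hr, if_pos rfl]

-- B's walk over the pair list computes the per-block values of the grouping
lemma walk_eq : ∀ (n : Nat) (cs : List (List Char)), cs.length ≤ n →
    (∀ c ∈ cs, c ≠ []) →
    pbWalk (cs.map pvPairOf) = ((pvGroup [] cs).map evalG).sum := by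
  intro n
  induction n with
  | zero =>
    intro cs hlen _
    cases cs with
    | nil => simp [pbWalk, pvGroup]
    | cons c t => simp at hlen
  | succ m ih =>
    intro cs hlen hne
    cases cs with
    | nil => simp [pbWalk, pvGroup]
    | cons c t =>
      have hc : c ≠ [] := hne c List.mem_cons_self
      rw [List.map_cons, pbWalk]
      rw [blank_eq c hc]
      by_cases hb : pvIsBlank c
      · rw [if_pos hb]
        rw [ih t (by simpa using hlen) (fun x hx => hne x (List.mem_cons_of_mem _ hx))]
        rw [show pvGroup [] (c :: t) = pvGroup [] t from by
              rw [pvGroup, if_pos hb, if_pos rfl]]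
      · rw [if_neg (by simp [hb])]
        -- rewrite the takeWhile/dropWhile over pairs as over columns
        have htw : (pvPairOf c :: t.map pvPairOf).takeWhile (fun q => !pbBlank q)
            = ((c :: t).takeWhile (fun c => !pvIsBlank c)).map pvPairOf := by
          rw [← List.map_cons, List.takeWhile_map]
          congr 1
          exact tw_congr _ _ (c :: t) (fun x hx => by
            simp only [Function.comp]; rw [blank_eq x (hne x hx)])
        have hdw : (pvPairOf c :: t.map pvPairOf).dropWhile (fun q => !pbBlank q)
            = ((c :: t).dropWhile (fun c => !pvIsBlank c)).map pvPairOf := by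
          rw [← List.map_cons, List.dropWhile_map]
          congr 1
          exact dw_congr _ _ (c :: t) (fun x hx => by
            simp only [Function.comp]; rw [blank_eq x (hne x hx)])
        rw [htw, hdw]
        set B0 := (c :: t).takeWhile (fun c => !pvIsBlank c) with hB0
        set R0 := (c :: t).dropWhile (fun c => !pvIsBlank c) with hR0
        have hB0ne : ∀ x ∈ B0, x ≠ [] := fun x hx =>
          hne x ((List.takeWhile_sublist _).mem hx)
        have hR0len : R0.length ≤ m := by
          have : R0 = t.dropWhile (fun c => !pvIsBlank c) := by
            rw [hR0, List.dropWhile_cons, if_pos (by simp [hb])]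
          rw [this]
          have := List.length_dropWhile_le (fun c => !pvIsBlank c) t
          simp only [List.length_cons] at hlen
          omega
        have hR0ne : ∀ x ∈ R0, x ≠ [] := fun x hx =>
          hne x ((List.dropWhile_sublist _).mem hx)
        -- vals fold = pvVals B0
        have hvals : (B0.map pvPairOf).foldl
              (fun vals q => if q.1 ≠ [] then vals ++ [(PySem.Int.ofChars? q.1).getD 0] else vals) []
            = pvVals B0 := by
          rw [List.foldl_map]; rfl
        -- op fold = pvOp B0
        have hop : (B0.map pvPairOf).foldl
              (fun op q => if op = (none : Option Char) ∧ q.2 ≠ ' ' then some q.2 else op)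
              (none : Option Char)
            = pvOp B0 := by
          rw [List.foldl_map]
          have h1 := opFold_none (B0.map (fun c => c.getLastD ' '))
          rw [List.foldl_map] at h1
          exact h1.trans (by rw [pvOp, pvOps_eq B0 hB0ne])
        dsimp only
        rw [hvals, hop]
        rw [ih R0 hR0len hR0ne]
        rw [group_cons_span c t (Bool.eq_false_iff.mpr hb)]
        rw [List.map_cons, List.sum_cons]
        rfl

lemma B_eq (data : List String) (hne : data ≠ [])
    (hnz : ∀ c ∈ pvCols data, c ≠ []) :
    part2_alt data = ((pvBlocks data).map evalG).sum := by
  unfold part2_alt pvBlocks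
  rw [zip_eq_map data hne]
  exact walk_eq (pvCols data).length (pvCols data) (le_refl _) hnz

-- A's fold over the blocks is the plain sum when every block has a +/* operator
lemma A_sum : ∀ (bl : List (List (List Char))), (∀ b ∈ bl, pvGoodOp b = true) →
    ∀ (tot : Int) (res : Option Int),
      (bl.foldl pvStepA (tot, res)).1 = tot + (bl.map evalG).sum := by
  intro bl
  induction bl with
  | nil => intro _ tot res; simp
  | cons b t ih =>
    intro hgood tot res
    have hb : pvGoodOp b = true := hgood b List.mem_cons_self
    have hupd : pvUpd b res = some (evalG b) := by
      unfold pvUpd evalG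
      rcases (by simpa [pvGoodOp] using hb : pvOp b = some '+' ∨ pvOp b = some '*') with h | h
      · simp [h]
      · simp [h]
    rw [List.foldl_cons,
        show pvStepA (tot, res) b = (tot + evalG b, some (evalG b)) from by
          unfold pvStepA; rw [hupd]; rfl]
    rw [ih (fun x hx => hgood x (List.mem_cons_of_mem _ hx))]
    simp [add_assoc]

-- bridges between the pre* readers used by Pre_ and the proof-side pv* readers
lemma width_eq (data : List String) : preWidth data = pbWidth data := by
  unfold preWidth pbWidth
  cases data with
  | nil => rfl
  | cons d t =>
    simp only [List.map_cons, List.foldl_cons]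
    rw [max_eq_right (Int.natCast_nonneg d.toList.length), List.foldl_map]
    simp [PySem.Str.len_eq]

lemma cols_eq (data : List String) : preCols data = pvCols data := by
  unfold preCols pvCols
  rw [width_eq]

lemma group_eq : ∀ (cs cur : List (List Char)), preGroup cur cs = pvGroup cur cs := by
  intro cs
  induction cs with
  | nil => intro cur; rfl
  | cons c t ih =>
    intro cur
    rw [preGroup, pvGroup]
    have hiff : (c.any (fun ch => !(ch == ' ')) = true) ↔ ¬ (pvIsBlank c = true) := by
      simp [pvIsBlank, List.any_eq_true, List.all_eq_true]
    by_cases hb : pvIsBlank c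
    · rw [if_neg (fun hh => (hiff.mp hh) hb), if_pos hb]
      by_cases hc : cur = [] <;> simp [hc, ih]
    · rw [if_pos (hiff.mpr hb), if_neg hb, ih]

lemma blocks_eq (data : List String) : preBlocks data = pvBlocks data := by
  unfold preBlocks pvBlocks
  rw [cols_eq, group_eq]

lemma group_mem : ∀ (cs cur : List (List Char)) (b : List (List Char)),
    b ∈ preGroup cur cs → ∀ c ∈ b, c ∈ cur ∨ c ∈ cs := by
  intro cs
  induction cs with
  | nil =>
    intro cur b hb c hc
    by_cases h : cur = []
    · simp [preGroup, h] at hb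
    · simp [preGroup, h] at hb
      subst hb; exact Or.inl hc
  | cons c0 t ih =>
    intro cur b hb c hc
    rw [preGroup] at hb
    by_cases h0 : c0.any (fun ch => !(ch == ' ')) = true
    · rw [if_pos h0] at hb
      rcases ih (cur ++ [c0]) b hb c hc with h | h
      · rcases List.mem_append.mp h with h' | h'
        · exact Or.inl h'
        · simp at h'; subst h'; exact Or.inr (List.mem_cons_self)
      · exact Or.inr (List.mem_cons_of_mem _ h)
    · rw [if_neg h0] at hb
      by_cases hcur : cur = []
      · rw [if_pos hcur] at hb
        rcases ih [] b hb c hc with h | h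
        · simp at h
        · exact Or.inr (List.mem_cons_of_mem _ h)
      · rw [if_neg hcur] at hb
        rcases List.mem_cons.mp hb with rfl | hb'
        · exact Or.inl hc
        · rcases ih [] b hb' c hc with h | h
          · simp at h
          · exact Or.inr (List.mem_cons_of_mem _ h)

lemma preCols_mem_len (data : List String) (c : List Char) (hc : c ∈ preCols data) :
    c.length = data.length := by
  unfold preCols at hc
  rcases List.mem_map.mp hc with ⟨i, _, rfl⟩
  simp

lemma filterMap_getLast (b : List (List Char)) (h : ∀ c ∈ b, c ≠ []) :
    b.filterMap (fun c => c.getLast?) = b.map (fun c => c.getLastD ' ') := by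
  induction b with
  | nil => rfl
  | cons c t ih =>
    have hc : c ≠ [] := h c List.mem_cons_self
    rw [List.filterMap_cons, List.map_cons,
        List.getLast?_eq_some_getLast hc]
    rw [ih (fun x hx => h x (List.mem_cons_of_mem _ hx))]
    rw [getLastD_getLast c ' ' hc]

lemma pred_eq : (fun o : Char => decide (o ≠ ' ')) = (fun ch : Char => !(ch == ' ')) := by
  funext o
  by_cases h : o = ' ' <;> simp [h]

lemma goodOp_bridge (b : List (List Char)) (h : ∀ c ∈ b, c ≠ []) :
    preGoodOp b = pvGoodOp b := by
  unfold preGoodOp pvGoodOp preOp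
  rw [show pvOp b = ((b.map (fun c => c.getLastD ' ')).filter (fun o => o ≠ ' ')).head? from by
        rw [pvOp, pvOps_eq b h]]
  rw [← List.head?_filter, filterMap_getLast b h, pred_eq]

-- ===== VERDICT (by name: the statement is the Claim_ definition above) =====
theorem part2_spec : Claim_equal_part2 := by
  intro data _hdom hpre
  obtain ⟨hne, _hints, hgood⟩ := hpre
  show part2 data = part2_alt data
  have hnz : ∀ c ∈ pvCols data, c ≠ [] := by
    intro c hc
    rw [← cols_eq] at hc
    have := preCols_mem_len data c hc
    intro hnil
    rw [hnil] at this
    exact hne (List.eq_nil_of_length_eq_zero this.symm)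
  rw [A_eq data hne, B_eq data hne hnz]
  rw [A_sum (pvBlocks data) ?_ 0 none, zero_add]
  intro b hb
  have hb' : b ∈ preBlocks data := by rw [blocks_eq]; exact hb
  have hcne : ∀ c ∈ b, c ≠ [] := by
    intro c hc
    rcases group_mem (preCols data) [] b hb' c hc with h | h
    · simp at h
    · have hlen := preCols_mem_len data c h
      intro hnil
      rw [hnil] at hlen
      exact hne (List.eq_nil_of_length_eq_zero hlen.symm)
  rw [← goodOp_bridge b hcne]
  exact hgood b hb'
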